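-- pv_equiv track=rewrite | github.com/kuality/KCTF-jr-2025 | REV/rev_basic_1/private/keygen.py | decrypt_char
-- ===== SOURCE A (Python) =====
-- def decrypt_char(target_val, i):
--     for c in range(32, 127):
--         if i % 3 == 0:
--             val = (ord(chr(c)) ^ 0x42) + 3
--         elif i % 3 == 1:
--             val = (ord(chr(c)) ^ 0x37) - 5
--         else:
--             val = (ord(chr(c)) ^ 0x55) + 7
--
--         if (val & 0xFF) == target_val:
--             return chr(c)
--     return None
-- ===== SOURCE B (Python) =====
-- def decrypt_char(target_val, i):
--     key, offset = ((0x42, 3), (0x37, -5), (0x55, 7))[i % 3]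
--     if not (0 <= target_val <= 255):
--         return None
--     c = ((target_val - offset) % 256) ^ key
--     if 32 <= c <= 126:
--         return chr(c)
--     return None
-- ===== Notes on version B (the rewrite author's own statement) =====
-- stated objective: alternative
-- what changed: B inverts the transform algebraically (c = ((target - offset) % 256) ^ key) and validates the one candidate, instead of A's brute-force scan over the 95 printable characters.
import Mathlib
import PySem

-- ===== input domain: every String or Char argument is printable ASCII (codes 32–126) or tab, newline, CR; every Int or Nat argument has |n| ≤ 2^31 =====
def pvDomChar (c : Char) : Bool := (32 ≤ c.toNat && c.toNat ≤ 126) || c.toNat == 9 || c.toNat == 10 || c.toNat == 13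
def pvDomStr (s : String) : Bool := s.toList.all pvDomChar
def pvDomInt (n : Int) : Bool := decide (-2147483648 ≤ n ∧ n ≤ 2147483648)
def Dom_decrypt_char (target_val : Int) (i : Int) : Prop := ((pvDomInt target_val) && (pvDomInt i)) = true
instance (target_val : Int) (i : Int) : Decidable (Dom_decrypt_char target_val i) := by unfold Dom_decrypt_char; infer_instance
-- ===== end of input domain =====

-- B replaces A's brute-force scan over the 95 printable characters by a direct algebraic
-- inversion of the transform (one candidate, validated) — objective: alternative (O(1) vs a 95-step scan; not measurably faster at these sizes).

-- ===== PORT A =====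
-- the 'for c in range(32, 127): … return chr(c) / return None' loop of A, step for step
def pvALoop (target_val : Int) (i : Int) : List Int → Option String
  | [] => none
  | c :: rest =>
    let val : Int :=
      if PySem.Int.mod i 3 = 0 then PySem.Int.bxor c 0x42 + 3
      else if PySem.Int.mod i 3 = 1 then PySem.Int.bxor c 0x37 - 5
      else PySem.Int.bxor c 0x55 + 7
    if PySem.Int.band val 0xFF = target_val then some (String.ofList [Char.ofNat c.toNat])
    else pvALoop target_val i rest

def decrypt_char (target_val : Int) (i : Int) : Option String :=
  pvALoop target_val i (PySem.List.pyRange 32 127 1)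

-- ===== PORT B =====
def decrypt_char_alt (target_val : Int) (i : Int) : Option String :=
  -- ((0x42, 3), (0x37, -5), (0x55, 7))[i % 3]
  let p : Int × Int :=
    if PySem.Int.mod i 3 = 0 then (0x42, 3)
    else if PySem.Int.mod i 3 = 1 then (0x37, -5)
    else (0x55, 7)
  if ¬ (0 ≤ target_val ∧ target_val ≤ 255) then none
  else
    let c : Int := PySem.Int.bxor (PySem.Int.mod (target_val - p.2) 256) p.1
    if 32 ≤ c ∧ c ≤ 126 then some (String.ofList [Char.ofNat c.toNat]) else none

-- ===== PRECONDITION & SPEC =====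
def Spec_decrypt_char (target_val : Int) (i : Int) (out : Option String) : Prop := out = decrypt_char_alt target_val i
instance (target_val : Int) (i : Int) (out : Option String) : Decidable (Spec_decrypt_char target_val i out) := by unfold Spec_decrypt_char; infer_instance

-- ===== CLAIM (what is proved, stated in full; the proofs are below) =====
def Claim_equal_decrypt_char : Prop := ∀ (target_val : Int) (i : Int), Dom_decrypt_char target_val i → Spec_decrypt_char target_val i (decrypt_char target_val i)

-- ===== LEMMAS AND PROOFS =====

-- both programs read i only through i % 3
theorem pvALoop_congr (t i j : Int) (h : PySem.Int.mod i 3 = PySem.Int.mod j 3) :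
    ∀ l : List Int, pvALoop t i l = pvALoop t j l := by
  intro l
  induction l with
  | nil => rfl
  | cons c rest ih => simp only [pvALoop, h, ih]

theorem alt_congr (t i j : Int) (h : PySem.Int.mod i 3 = PySem.Int.mod j 3) :
    decrypt_char_alt t i = decrypt_char_alt t j := by
  simp only [decrypt_char_alt, h]

theorem mod3_cases (i : Int) :
    PySem.Int.mod i 3 = 0 ∨ PySem.Int.mod i 3 = 1 ∨ PySem.Int.mod i 3 = 2 := by
  have h1 := PySem.Int.mod_nonneg i (b := 3) (by omega)
  have h2 := PySem.Int.mod_lt i (b := 3) (by omega)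
  omega

theorem mod3_self (r : Int) (h : r = 0 ∨ r = 1 ∨ r = 2) : PySem.Int.mod r 3 = r := by
  rcases h with h | h | h <;> subst h <;> decide

-- A's (val & 0xFF) always lies in [0, 255] on the scanned characters
theorem band_bounds :
    ∀ c ∈ Finset.Icc (32 : Int) 126,
      (0 ≤ PySem.Int.band (PySem.Int.bxor c 0x42 + 3) 0xFF ∧
        PySem.Int.band (PySem.Int.bxor c 0x42 + 3) 0xFF ≤ 255) ∧
      (0 ≤ PySem.Int.band (PySem.Int.bxor c 0x37 - 5) 0xFF ∧
        PySem.Int.band (PySem.Int.bxor c 0x37 - 5) 0xFF ≤ 255) ∧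
      (0 ≤ PySem.Int.band (PySem.Int.bxor c 0x55 + 7) 0xFF ∧
        PySem.Int.band (PySem.Int.bxor c 0x55 + 7) 0xFF ≤ 255) := by
  decide

-- out-of-range targets: A's scan finds nothing
theorem pvALoop_none (t i : Int) (ht : t < 0 ∨ 255 < t) :
    ∀ l : List Int, (∀ c ∈ l, 32 ≤ c ∧ c ≤ 126) → pvALoop t i l = none := by
  intro l
  induction l with
  | nil => intro _; rfl
  | cons c rest ih =>
    intro hmem
    have hc := hmem c (by simp)
    have hb := band_bounds c (by simp [Finset.mem_Icc]; omega)
    simp only [pvALoop]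
    rw [if_neg, ih (fun x hx => hmem x (by simp [hx]))]
    split_ifs <;> omega

-- in-range targets, all three residues: finite check
set_option maxRecDepth 40000 in
theorem fin_check :
    ∀ t : Fin 256, ∀ r : Fin 3,
      decrypt_char (t.val : Int) (r.val : Int) = decrypt_char_alt (t.val : Int) (r.val : Int) := by
  decide

-- ===== VERDICT (by name: the statement is the Claim_ definition above) =====
theorem decrypt_char_spec : Claim_equal_decrypt_char := by
  intro t i _
  unfold Spec_decrypt_char
  have hr := mod3_cases i
  set r := PySem.Int.mod i 3 with hrdef
  have hmm : PySem.Int.mod i 3 = PySem.Int.mod r 3 := by rw [mod3_self r hr]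
  by_cases ht : 0 ≤ t ∧ t ≤ 255
  · have hfin := fin_check ⟨t.toNat, by omega⟩ ⟨r.toNat, by omega⟩
    have htn : (t.toNat : Int) = t := Int.toNat_of_nonneg ht.1
    have hrn : (r.toNat : Int) = r := Int.toNat_of_nonneg (by omega)
    rw [htn, hrn] at hfin
    calc decrypt_char t i = decrypt_char t r := pvALoop_congr t i r hmm _
      _ = decrypt_char_alt t r := hfin
      _ = decrypt_char_alt t i := (alt_congr t i r hmm).symm
  · have hA : decrypt_char t i = none := by
      apply pvALoop_none t i (by omega)
      intro c hc
      have := (PySem.List.mem_pyRange_one (a := 32) (b := 127) (x := c)).mp hc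
      omega
    have hB : decrypt_char_alt t i = none := by
      simp only [decrypt_char_alt]
      rw [if_pos ht]
    rw [hA, hB]
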